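-- pv_equiv track=rewrite | github.com/Rpratik13/HackerRank | bestDivisor.py | bestDivisor
-- ===== SOURCE A (Python) =====
-- def digitSum(num):
--     ans = 0;
--     while num != 0:
--         ans += num % 10;
--         num //= 10;
--     return ans
--
-- def bestDivisor(num):
--     sm = 0;
--     ans = 0;
--     for i in range(num):
--         if (num % (i + 1)) == 0:
--             digit_sm = digitSum(i + 1);
--             if sm == digit_sm:
--                 if i < ans:
--                     ans = i + 1;
--             elif sm < digit_sm:
--                 ans = i + 1;
--                 sm = digit_sm;
--     return ans
-- ===== SOURCE B (Python) =====
-- def digitSum(num):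
--     ans = 0
--     while num != 0:
--         ans += num % 10
--         num //= 10
--     return ans
--
-- def bestDivisor(num):
--     # no positive divisors to scan for non-positive num
--     if num <= 0:
--         return 0
--     best = 0
--     i = 1
--     while i * i <= num:
--         if num % i == 0:
--             for d in (i, num // i):
--                 if digitSum(d) > digitSum(best) or (digitSum(d) == digitSum(best) and d < best):
--                     best = d
--         i += 1
--     return best
-- ===== Notes on version B (the rewrite author's own statement) =====
-- stated objective: faster
-- what changed: B enumerates divisor pairs (i, num//i) only up to sqrt(num) and keeps the lexicographically best (max digit sum, then smallest divisor) in one pass, instead of A's scan of every integer from 1 to num.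
import Mathlib
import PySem

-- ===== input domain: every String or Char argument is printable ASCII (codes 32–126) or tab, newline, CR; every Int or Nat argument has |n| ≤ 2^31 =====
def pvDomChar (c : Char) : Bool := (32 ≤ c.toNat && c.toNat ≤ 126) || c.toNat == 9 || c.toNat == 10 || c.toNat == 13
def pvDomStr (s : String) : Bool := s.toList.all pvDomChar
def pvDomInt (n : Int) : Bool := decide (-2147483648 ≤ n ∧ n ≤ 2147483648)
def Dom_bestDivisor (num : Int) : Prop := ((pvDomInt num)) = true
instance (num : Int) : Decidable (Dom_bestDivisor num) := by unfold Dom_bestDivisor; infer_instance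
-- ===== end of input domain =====

-- B replaces A's scan of every integer in [1, num] by an enumeration of divisor pairs
-- (i, num // i) for i up to sqrt(num), keeping the best (max digit sum, then smallest
-- divisor); objective: faster (asymptotically fewer candidates).

-- shared helper: literal port of the Python digitSum loop (the accumulator loop becomes
-- the obvious structural recursion); Python diverges for negative input (never reached
-- by either caller), the guard 0 < num makes the Lean function total and is exact on num ≥ 0.
def pyDigitSum (num : Int) : Int :=
  if h : 0 < num then PySem.Int.mod num 10 + pyDigitSum (PySem.Int.floordiv num 10) else 0
termination_by num.toNat
decreasing_by
  have h10 : PySem.Int.floordiv num 10 = num / 10 := PySem.Int.floordiv_eq_ediv_of_pos (by omega)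
  have h1 : num / 10 < num := by
    have := Int.ediv_le_self (b := 10) (le_of_lt h)
    rcases lt_or_eq_of_le this with h2 | h2
    · exact h2
    · exfalso
      have := Int.ediv_le_ediv (by omega : (0:Int) < 10) (le_refl num)
      have h3 : num / 10 * 10 ≤ num := Int.ediv_mul_le num (by omega)
      omega
  have h2 : 0 ≤ num / 10 := Int.ediv_nonneg (by omega) (by omega)
  omega

-- ===== PORT A =====
def bestDivisor (num : Int) : Int :=
  ((PySem.List.pyRange 0 num 1).foldl
    (fun (st : Int × Int) i =>
      if PySem.Int.mod num (i + 1) == 0 then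
        let digit_sm := pyDigitSum (i + 1)
        if st.1 == digit_sm then (if i < st.2 then (st.1, i + 1) else st)
        else if st.1 < digit_sm then (digit_sm, i + 1)
        else st
      else st)
    (0, 0)).2

-- ===== PORT B =====
-- one candidate update: keep d if it has a larger digit sum, or the same digit sum and is smaller
def gstepB (best d : Int) : Int :=
  if pyDigitSum d > pyDigitSum best ∨ (pyDigitSum d = pyDigitSum best ∧ d < best) then d else best

-- port cites this for termination: i*i ≤ num forces i ≤ num
theorem le_of_sq_le {i num : Int} (h : i * i ≤ num) : i ≤ num := by
  by_cases h1 : 1 ≤ i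
  · nlinarith
  · nlinarith [mul_self_nonneg i]

-- the while-loop of B: i ascending while i*i ≤ num, folding both members of each divisor pair
def loopB (num i best : Int) : Int :=
  if h : i * i ≤ num then
    loopB num (i + 1)
      (if PySem.Int.mod num i == 0 then
        [i, PySem.Int.floordiv num i].foldl gstepB best
      else best)
  else best
termination_by (num + 1 - i).toNat
decreasing_by
  have := le_of_sq_le h
  omega

def bestDivisor_alt (num : Int) : Int :=
  if num ≤ 0 then 0 else loopB num 1 0

-- ===== PRECONDITION & SPEC =====
def Spec_bestDivisor (num : Int) (out : Int) : Prop := out = bestDivisor_alt num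
instance (num : Int) (out : Int) : Decidable (Spec_bestDivisor num out) := by unfold Spec_bestDivisor; infer_instance

-- ===== CLAIM (what is proved, stated in full; the proofs are below) =====
def Claim_equal_bestDivisor : Prop := ∀ (num : Int), Dom_bestDivisor num → Spec_bestDivisor num (bestDivisor num)

-- ===== LEMMAS AND PROOFS =====

-- "d is strictly better than e": larger digit sum, or equal digit sum and smaller
def Bet (d e : Int) : Prop :=
  pyDigitSum d > pyDigitSum e ∨ (pyDigitSum d = pyDigitSum e ∧ d < e)

theorem gstep_or (b d : Int) : gstepB b d = b ∨ gstepB b d = d := by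
  unfold gstepB; split
  · exact Or.inr rfl
  · exact Or.inl rfl

theorem gstep_notBet (b d : Int) : ¬ Bet b (gstepB b d) ∧ ¬ Bet d (gstepB b d) := by
  unfold gstepB Bet
  split_ifs with h
  · constructor
    · omega
    · omega
  · constructor
    · omega
    · omega

theorem bet_irrefl (x : Int) : ¬ Bet x x := by
  unfold Bet; omega

theorem bet_total {d e : Int} (h : d ≠ e) : Bet d e ∨ Bet e d := by
  unfold Bet; omega

theorem notBet_trans {x y z : Int} (h1 : ¬ Bet x y) (h2 : ¬ Bet y z) : ¬ Bet x z := by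
  unfold Bet at *; omega

theorem foldl_gstep_mem (l : List Int) (b : Int) : l.foldl gstepB b ∈ b :: l := by
  induction l generalizing b with
  | nil => simp [List.foldl]
  | cons d l ih =>
    simp only [List.foldl_cons]
    rcases List.mem_cons.1 (ih (gstepB b d)) with h | h
    · rw [h]
      rcases gstep_or b d with hg | hg <;> simp [hg]
    · simp [h]

theorem foldl_gstep_best (l : List Int) (b : Int) :
    ∀ x ∈ b :: l, ¬ Bet x (l.foldl gstepB b) := by
  induction l generalizing b with
  | nil =>
    intro x hx
    simp at hx; subst hx
    simpa using bet_irrefl x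
  | cons d l ih =>
    intro x hx
    simp only [List.foldl_cons]
    have hg : ¬ Bet b (gstepB b d) ∧ ¬ Bet d (gstepB b d) := gstep_notBet b d
    have hr : ¬ Bet (gstepB b d) (l.foldl gstepB (gstepB b d)) :=
      ih (gstepB b d) _ (List.mem_cons_self ..)
    rcases List.mem_cons.1 hx with h | h
    · subst h; exact notBet_trans hg.1 hr
    · rcases List.mem_cons.1 h with h | h
      · subst h; exact notBet_trans hg.2 hr
      · exact ih (gstepB b d) x (List.mem_cons_of_mem _ h)

theorem foldl_gstep_eq_of_mem_iff (l₁ l₂ : List Int) (b : Int)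
    (h : ∀ x, x ∈ b :: l₁ ↔ x ∈ b :: l₂) :
    l₁.foldl gstepB b = l₂.foldl gstepB b := by
  by_contra hne
  rcases bet_total hne with hb | hb
  · exact foldl_gstep_best l₂ b _ ((h _).1 (foldl_gstep_mem l₁ b)) hb
  · exact foldl_gstep_best l₁ b _ ((h _).2 (foldl_gstep_mem l₂ b)) hb

-- ===== reduction of A's fold =====

-- A's step, with invariant st.1 = pyDigitSum st.2, acts on the second component as gstepB
-- A's step under the invariant st = (pyDigitSum ans, ans), in the simp-normal form of the fold
theorem stepA_eq (num ans i : Int) :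
    (if (PySem.Int.mod num (i + 1) == 0) = true then
        if (pyDigitSum ans == pyDigitSum (i + 1)) = true then
          (if i < ans then (pyDigitSum ans, i + 1) else ((pyDigitSum ans, ans) : Int × Int))
        else if pyDigitSum ans < pyDigitSum (i + 1) then (pyDigitSum (i + 1), i + 1)
        else (pyDigitSum ans, ans)
      else (pyDigitSum ans, ans))
    = (pyDigitSum (if (PySem.Int.mod num (i + 1) == 0) = true then gstepB ans (i + 1) else ans),
       if (PySem.Int.mod num (i + 1) == 0) = true then gstepB ans (i + 1) else ans) := by
  simp only [gstepB, beq_iff_eq]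
  split_ifs <;> simp_all <;> omega

theorem foldA_eq (num : Int) (l : List Int) (ans : Int) :
    (l.foldl
      (fun (st : Int × Int) i =>
        if PySem.Int.mod num (i + 1) == 0 then
          let digit_sm := pyDigitSum (i + 1)
          if st.1 == digit_sm then (if i < st.2 then (st.1, i + 1) else st)
          else if st.1 < digit_sm then (digit_sm, i + 1)
          else st
        else st) (pyDigitSum ans, ans)).2
    = l.foldl (fun a i => if PySem.Int.mod num (i + 1) == 0 then gstepB a (i + 1) else a) ans := by
  induction l generalizing ans with
  | nil => rfl
  | cons i l ih =>
    simp only [List.foldl_cons]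
    rw [stepA_eq]
    exact ih _

-- folding a guarded step over l equals folding gstepB over the filtered, mapped list
theorem foldl_filter_map (l : List Int) (b : Int) (p : Int → Bool) (f : Int → Int) :
    l.foldl (fun a i => if p i then gstepB a (f i) else a) b
    = ((l.filter p).map f).foldl gstepB b := by
  induction l generalizing b with
  | nil => rfl
  | cons i l ih =>
    by_cases h : p i <;> simp [List.foldl_cons, h, ih]

-- the divisor list A effectively folds over
def DA (num : Int) : List Int :=
  (((PySem.List.pyRange 0 num 1).filter (fun i => PySem.Int.mod num (i + 1) == 0)).map (· + 1))

theorem pyDigitSum_zero : pyDigitSum 0 = 0 := by rw [pyDigitSum]; simp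

theorem bestDivisor_eq_fold (num : Int) :
    bestDivisor num = (DA num).foldl gstepB 0 := by
  unfold bestDivisor DA
  have h0 : ((0 : Int), (0 : Int)) = (pyDigitSum 0, 0) := by rw [pyDigitSum_zero]
  rw [h0, foldA_eq, foldl_filter_map]

theorem mem_DA (num x : Int) :
    x ∈ DA num ↔ 1 ≤ x ∧ x ≤ num ∧ PySem.Int.mod num x = 0 := by
  unfold DA
  simp only [List.mem_map, List.mem_filter, PySem.List.mem_pyRange_one, beq_iff_eq]
  constructor
  · rintro ⟨i, ⟨⟨h0, h1⟩, h2⟩, rfl⟩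
    exact ⟨by omega, by omega, h2⟩
  · rintro ⟨h1, h2, h3⟩
    exact ⟨x - 1, ⟨⟨by omega, by omega⟩, by simpa using h3⟩, by omega⟩

-- ===== reduction of B's loop =====

def candL (num i : Int) : List Int :=
  if h : i * i ≤ num then
    (if PySem.Int.mod num i == 0 then [i, PySem.Int.floordiv num i] else [])
      ++ candL num (i + 1)
  else []
termination_by (num + 1 - i).toNat
decreasing_by
  have := le_of_sq_le h
  omega

theorem loopB_eq_fold (num : Int) :
    ∀ (n : Nat) (i b : Int), (num + 1 - i).toNat ≤ n →
      loopB num i b = (candL num i).foldl gstepB b := by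
  intro n
  induction n with
  | zero =>
    intro i b hn
    rw [loopB, candL]
    split
    · exfalso; have := le_of_sq_le ‹i * i ≤ num›; omega
    · rfl
  | succ n ih =>
    intro i b hn
    rw [loopB, candL]
    split
    · have hi := le_of_sq_le ‹i * i ≤ num›
      rw [ih (i + 1) _ (by omega), List.foldl_append]
      split <;> rfl
    · rfl

theorem mem_candL (num : Int) :
    ∀ (n : Nat) (i x : Int), (num + 1 - i).toNat ≤ n → 1 ≤ i →
      (x ∈ candL num i ↔
        ∃ j, i ≤ j ∧ j * j ≤ num ∧ PySem.Int.mod num j = 0 ∧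
          (x = j ∨ x = PySem.Int.floordiv num j)) := by
  intro n
  induction n with
  | zero =>
    intro i x hn hi
    rw [candL]
    split
    · exfalso; have := le_of_sq_le ‹i * i ≤ num›; omega
    · simp only [List.not_mem_nil, false_iff]
      rintro ⟨j, hij, hjj, -, -⟩
      have : i * i ≤ j * j := by nlinarith
      omega
  | succ n ih =>
    intro i x hn hi
    rw [candL]
    split
    · have hii := le_of_sq_le ‹i * i ≤ num›
      rw [List.mem_append, ih (i + 1) x (by omega) (by omega)]
      constructor
      · rintro (hx | ⟨j, h1, h2, h3, h4⟩)
        · by_cases hm : (PySem.Int.mod num i == 0) = true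
          · rw [if_pos hm] at hx
            simp only [List.mem_cons, List.not_mem_nil, or_false] at hx
            exact ⟨i, le_refl i, ‹i * i ≤ num›, by simpa using hm, hx⟩
          · rw [if_neg hm] at hx
            simp at hx
        · exact ⟨j, by omega, h2, h3, h4⟩
      · rintro ⟨j, h1, h2, h3, h4⟩
        rcases eq_or_lt_of_le h1 with rfl | hlt
        · left
          rw [if_pos (by simpa using h3)]
          simpa using h4
        · right
          exact ⟨j, by omega, h2, h3, h4⟩
    · simp only [List.not_mem_nil, false_iff]
      rintro ⟨j, hij, hjj, -, -⟩
      have : i * i ≤ j * j := by nlinarith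
      omega

-- ===== the divisor-pair argument: same member set =====

theorem mem_equiv (num : Int) (hnum : 1 ≤ num) (x : Int) :
    x ∈ DA num ↔ x ∈ candL num 1 := by
  rw [mem_DA, mem_candL num ((num + 1 - 1).toNat) 1 x (le_refl _) (le_refl _)]
  constructor
  · rintro ⟨h1, h2, h3⟩
    have hmod : PySem.Int.mod num x = num % x := PySem.Int.mod_eq_emod_of_pos (by omega)
    have hdvd : x ∣ num := Int.dvd_of_emod_eq_zero (by omega)
    obtain ⟨q, hq⟩ := hdvd
    have hq1 : 1 ≤ q := by
      by_contra hc
      push Not at hc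
      nlinarith
    by_cases hsq : x * x ≤ num
    · exact ⟨x, h1, hsq, h3, Or.inl rfl⟩
    · have hqx : q < x := by nlinarith
      refine ⟨q, hq1, by nlinarith, ?_, Or.inr ?_⟩
      · rw [PySem.Int.mod_eq_emod_of_pos (by omega)]
        exact Int.emod_eq_zero_of_dvd ⟨x, by linarith [hq, mul_comm x q]⟩
      · rw [PySem.Int.floordiv_eq_ediv_of_pos (by omega), hq]
        exact (Int.mul_ediv_cancel _ (by omega)).symm
  · rintro ⟨j, hj1, hjj, hmod, hx⟩
    have hjn : j ≤ num := by nlinarith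
    have hmod' : num % j = 0 := by
      rwa [PySem.Int.mod_eq_emod_of_pos (by omega)] at hmod
    have hdvd : j ∣ num := Int.dvd_of_emod_eq_zero hmod'
    obtain ⟨q, hq⟩ := hdvd
    have hq1 : 1 ≤ q := by
      by_contra hc
      push Not at hc
      nlinarith
    rcases hx with rfl | rfl
    · exact ⟨hj1, hjn, hmod⟩
    · rw [PySem.Int.floordiv_eq_ediv_of_pos (by omega), hq,
        Int.mul_ediv_cancel_left _ (by omega : j ≠ 0)]
      refine ⟨hq1, by nlinarith, ?_⟩
      rw [PySem.Int.mod_eq_emod_of_pos (by omega)]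
      exact Int.emod_eq_zero_of_dvd ⟨j, by linarith [hq, mul_comm j q]⟩

-- ===== VERDICT (by name: the statement is the Claim_ definition above) =====
theorem bestDivisor_spec : Claim_equal_bestDivisor := by
  intro num _
  unfold Spec_bestDivisor bestDivisor_alt
  split
  · rw [bestDivisor_eq_fold]
    unfold DA
    rw [PySem.List.pyRange_one_eq_nil (by omega)]
    rfl
  · rw [bestDivisor_eq_fold, loopB_eq_fold num ((num + 1 - 1).toNat) 1 0 (le_refl _)]
    apply foldl_gstep_eq_of_mem_iff
    intro x
    simp only [List.mem_cons]
    rw [mem_equiv num (by omega)]
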